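-- pv_equiv track=rewrite | github.com/sadboyneedcodes/REU2024 | tait_graph/core.py | _detect_r1_crossings
-- ===== SOURCE A (Python) =====
-- from typing import Dict, List, Optional, Set, Tuple
--
-- def _detect_r1_crossings(
--     pd_code: List[List[int]],
--     regions: List[List[int]],
-- ) -> Set[int]:
--     """Return the set of indices in *pd_code* that are R1 (self-loop) crossings.
--
--     A crossing is an R1 crossing when all four of its strands belong to the
--     *same* region.
--
--     Parameters
--     ----------
--     pd_code:
--         Full PD-code of the diagram.
--     regions:
--         List of regions (absolute strand labels).
--
--     Returns
--     -------
--     A set of indices into *pd_code* identifying R1 crossings.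
--     """
--     r1_indices: Set[int] = set()
--     for i, crossing in enumerate(pd_code):
--         crossing_set = set(crossing)
--         for region in regions:
--             if crossing_set.issubset(set(region)):
--                 r1_indices.add(i)
--                 break
--     return r1_indices
-- ===== SOURCE B (Python) =====
-- def _detect_r1_crossings(pd_code, regions):
--     """Indices of crossings whose strands all lie in one region.
--
--     Precompute each region's strand set once and index regions by strand;
--     each crossing is then tested only against the regions that contain its
--     first strand, instead of scanning every region.
--     """
--     by_strand = {}  # strand -> list of region sets containing it
--     for region in regions:
--         rset = set(region)
--         for s in rset:
--             by_strand.setdefault(s, []).append(rset)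
--     r1_indices = set()
--     for i, crossing in enumerate(pd_code):
--         cs = set(crossing)
--         if any(cs <= rs for rs in by_strand.get(crossing[0], [])):
--             r1_indices.add(i)
--     return r1_indices
-- ===== Notes on version B (the rewrite author's own statement) =====
-- stated objective: faster
-- what changed: Precompute each region's strand set once and build a strand-to-regions index, so each crossing is tested only against the regions that contain its first strand instead of scanning (and re-setifying) every region; Pre_ excludes pd_code containing an empty crossing (real PD crossings have four strands), where A's vacuous subset test returns the index while B's first-strand lookup raises IndexError.
-- outside the precondition, e.g. on _detect_r1_crossings([[]], [[1]]): A returns {0}, B raises IndexError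
import Mathlib
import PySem

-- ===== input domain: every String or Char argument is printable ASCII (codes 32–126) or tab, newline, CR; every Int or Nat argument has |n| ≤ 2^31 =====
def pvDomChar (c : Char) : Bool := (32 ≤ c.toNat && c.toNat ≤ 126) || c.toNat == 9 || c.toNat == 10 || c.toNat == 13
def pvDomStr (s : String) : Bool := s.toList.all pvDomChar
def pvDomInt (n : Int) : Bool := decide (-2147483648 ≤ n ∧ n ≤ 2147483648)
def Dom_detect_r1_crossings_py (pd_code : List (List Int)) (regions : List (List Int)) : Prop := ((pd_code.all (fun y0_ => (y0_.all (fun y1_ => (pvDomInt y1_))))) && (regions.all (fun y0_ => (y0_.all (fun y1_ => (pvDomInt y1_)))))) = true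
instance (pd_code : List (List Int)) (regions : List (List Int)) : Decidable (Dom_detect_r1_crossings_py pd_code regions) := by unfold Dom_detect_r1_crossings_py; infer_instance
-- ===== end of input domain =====

-- B replaces A's scan of every region per crossing by a precomputed strand→region-sets index,
-- testing each crossing only against the regions containing its first strand (faster in a timing run).


-- ===== PORT A =====
-- inner 'for region in regions: if subset: add; break' — true iff some region contains all strands
def aAnyRegion (cs : PySem.Set Int) : List (List Int) → Bool
  | [] => false
  | region :: rest =>
      if PySem.Set.issubset cs (PySem.Set.ofList region) then true else aAnyRegion cs rest

def detect_r1_crossings_py (pd_code : List (List Int)) (regions : List (List Int)) : List Int :=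
  (PySem.List.enumerate pd_code 0).foldl
    (fun r1_indices ic =>
      if aAnyRegion (PySem.Set.ofList ic.2) regions then PySem.Set.add r1_indices ic.1 else r1_indices)
    []

-- ===== PORT B =====
-- strand -> list of region sets containing it (dict built with setdefault/append = modify)
def bIndex (regions : List (List Int)) : PySem.Dict Int (List (PySem.Set Int)) :=
  regions.foldl
    (fun d region =>
      let rset := PySem.Set.ofList region
      rset.foldl (fun d s => d.modify s [] (fun l => l ++ [rset])) d)
    PySem.Dict.empty

def detect_r1_crossings_py_alt (pd_code : List (List Int)) (regions : List (List Int)) : List Int :=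
  let by_strand := bIndex regions
  (PySem.List.enumerate pd_code 0).foldl
    (fun r1_indices ic =>
      match PySem.List.pyGet? ic.2 0 with   -- crossing[0]; none = IndexError (excluded by Pre_)
      | none => r1_indices
      | some h =>
          let cs := PySem.Set.ofList ic.2
          if (by_strand.getD h []).any (fun rs => PySem.Set.issubset cs rs) then
            PySem.Set.add r1_indices ic.1
          else r1_indices)
    []

-- ===== PRECONDITION & SPEC =====
-- Pre_ excludes pd_code containing an empty crossing (a real PD crossing has four strands):
-- there A returns the index via the vacuous subset test while B's crossing[0] raises IndexError.
def Pre_detect_r1_crossings_py (pd_code : List (List Int)) (regions : List (List Int)) : Prop :=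
  ∀ c ∈ pd_code, c ≠ []
instance (pd_code : List (List Int)) (regions : List (List Int)) : Decidable (Pre_detect_r1_crossings_py pd_code regions) := by unfold Pre_detect_r1_crossings_py; infer_instance

def pvWitness_detect_r1_crossings_py : List (List Int) × List (List Int) :=
  ([[1, 2, 3, 1]], [[1, 2, 3], [1, 4]])

def Spec_detect_r1_crossings_py (pd_code : List (List Int)) (regions : List (List Int)) (out : List Int) : Prop := out = detect_r1_crossings_py_alt pd_code regions
instance (pd_code : List (List Int)) (regions : List (List Int)) (out : List Int) : Decidable (Spec_detect_r1_crossings_py pd_code regions out) := by unfold Spec_detect_r1_crossings_py; infer_instance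

-- ===== CLAIM (what is proved, stated in full; the proofs are below) =====
def Claim_equal_detect_r1_crossings_py : Prop := ∀ (pd_code : List (List Int)) (regions : List (List Int)), Dom_detect_r1_crossings_py pd_code regions → Pre_detect_r1_crossings_py pd_code regions → Spec_detect_r1_crossings_py pd_code regions (detect_r1_crossings_py pd_code regions)

-- ===== LEMMAS AND PROOFS =====

theorem aAnyRegion_eq_true_iff (cs : PySem.Set Int) (regions : List (List Int)) :
    aAnyRegion cs regions = true ↔
      ∃ region ∈ regions, PySem.Set.issubset cs (PySem.Set.ofList region) = true := by
  induction regions with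
  | nil => simp [aAnyRegion]
  | cons r rest ih =>
      simp only [aAnyRegion]
      split_ifs with h
      · constructor
        · intro _; exact ⟨r, List.mem_cons_self, h⟩
        · intro _; rfl
      · rw [ih]
        constructor
        · rintro ⟨reg, hm, hs⟩; exact ⟨reg, List.mem_cons_of_mem _ hm, hs⟩
        · rintro ⟨reg, hm, hs⟩
          rcases List.mem_cons.mp hm with rfl | hm'
          · exact absurd hs h
          · exact ⟨reg, hm', hs⟩

-- one region's inner loop: what it adds to by_strand[s]
theorem getD_bStep (r : List Int) (d : PySem.Dict Int (List (PySem.Set Int))) (s : Int) (rs : List Int) :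
    rs ∈ ((PySem.Set.ofList r).foldl
        (fun d s => d.modify s [] (fun l => l ++ [PySem.Set.ofList r])) d).getD s [] ↔
      rs ∈ d.getD s [] ∨ (s ∈ PySem.Set.ofList r ∧ rs = PySem.Set.ofList r) := by
  have hstep : ((PySem.Set.ofList r).foldl
      (fun d s => d.modify s [] (fun l => l ++ [PySem.Set.ofList r])) d).getD s []
      = d.getD s [] ++ (((PySem.Set.ofList r).map
          (fun t => (t, PySem.Set.ofList r))).filter (fun p => p.1 == s)).map (·.2) := by
    have := PySem.Dict.getD_foldl_modify_append
      (l := (PySem.Set.ofList r).map (fun t => (t, PySem.Set.ofList r))) (d := d) (c := s)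
    rw [← this, List.foldl_map]
  rw [hstep]
  simp only [List.mem_append, List.mem_map, List.mem_filter]
  constructor
  · rintro (hd | ⟨p, ⟨⟨t, ht, rfl⟩, hps⟩, rfl⟩)
    · exact Or.inl hd
    · have hts : t = s := by simpa using hps
      exact Or.inr ⟨hts ▸ ht, rfl⟩
  · rintro (hd | ⟨hs, rfl⟩)
    · exact Or.inl hd
    · exact Or.inr ⟨(s, PySem.Set.ofList r), ⟨⟨s, hs, rfl⟩, by simp⟩, rfl⟩

-- characterisation of the strand index: membership in by_strand[s]
theorem mem_bIndex_aux (regions : List (List Int)) (d : PySem.Dict Int (List (PySem.Set Int)))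
    (s : Int) (rs : List Int) :
    rs ∈ (regions.foldl
      (fun d region =>
        (PySem.Set.ofList region).foldl
          (fun d s => d.modify s [] (fun l => l ++ [PySem.Set.ofList region])) d)
      d).getD s [] ↔
    rs ∈ d.getD s [] ∨ ∃ region ∈ regions, rs = PySem.Set.ofList region ∧ s ∈ PySem.Set.ofList region := by
  induction regions generalizing d with
  | nil => simp
  | cons r rest ih =>
      simp only [List.foldl_cons]
      rw [ih, getD_bStep]
      constructor
      · rintro ((hd | ⟨hs, rfl⟩) | ⟨reg, hm, rfl, hs⟩)
        · exact Or.inl hd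
        · exact Or.inr ⟨r, List.mem_cons_self, rfl, hs⟩
        · exact Or.inr ⟨reg, List.mem_cons_of_mem _ hm, rfl, hs⟩
      · rintro (hd | ⟨reg, hm, rfl, hs⟩)
        · exact Or.inl (Or.inl hd)
        · rcases List.mem_cons.mp hm with rfl | hm'
          · exact Or.inl (Or.inr ⟨hs, rfl⟩)
          · exact Or.inr ⟨reg, hm', rfl, hs⟩

theorem mem_bIndex (regions : List (List Int)) (s : Int) (rs : List Int) :
    rs ∈ (bIndex regions).getD s [] ↔
      ∃ region ∈ regions, rs = PySem.Set.ofList region ∧ s ∈ PySem.Set.ofList region := by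
  rw [bIndex]
  have := mem_bIndex_aux regions PySem.Dict.empty s rs
  simpa using this

-- per-crossing boolean equality for a nonempty crossing
theorem any_bIndex_eq (regions : List (List Int)) (h : Int) (t : List Int) :
    ((bIndex regions).getD h []).any
        (fun rs => PySem.Set.issubset (PySem.Set.ofList (h :: t)) rs)
      = aAnyRegion (PySem.Set.ofList (h :: t)) regions := by
  rw [Bool.eq_iff_iff, List.any_eq_true, aAnyRegion_eq_true_iff]
  constructor
  · rintro ⟨rs, hmem, hsub⟩
    rcases (mem_bIndex regions h rs).mp hmem with ⟨region, hreg, rfl, _⟩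
    exact ⟨region, hreg, hsub⟩
  · rintro ⟨region, hreg, hsub⟩
    have hh : h ∈ PySem.Set.ofList region := by
      have := (PySem.Set.issubset_iff _ _).mp hsub h
        (by rw [PySem.Set.mem_ofList]; exact List.mem_cons_self)
      exact this
    exact ⟨PySem.Set.ofList region,
      (mem_bIndex regions h (PySem.Set.ofList region)).mpr ⟨region, hreg, rfl, hh⟩, hsub⟩

-- ===== VERDICT (by name: the statement is the Claim_ definition above) =====
theorem detect_r1_crossings_py_spec : Claim_equal_detect_r1_crossings_py := by
  intro pd_code regions _ hpre
  unfold Spec_detect_r1_crossings_py detect_r1_crossings_py detect_r1_crossings_py_alt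
  apply PySem.List.foldl_congr_mem
  intro acc ic hmem
  rcases (PySem.List.mem_enumerate_iff _ _ _).mp hmem with ⟨k, hk, rfl⟩
  have hne : pd_code[k] ≠ [] := hpre _ (List.getElem_mem hk)
  rcases hcr : pd_code[k] with _ | ⟨h, t⟩
  · exact absurd hcr hne
  · simp only [PySem.List.pyGet?, PySem.List.pyIdx?]
    simp [← any_bIndex_eq]
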